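-- pv_equiv track=rewrite | github.com/chungdz/LeetCode | adobe/basic_calculator_II.py | parse_one
-- ===== SOURCE A (Python) =====
-- def parse_one(s):
--     sign = 1
--     if s[0] == '-':
--         sign = -1
--
--     slen = len(s)
--     cur_num = 1
--     pre_symbol = '*'
--     start = 1
--     while start < slen:
--         end = start + 1
--         while end < slen and s[end].isdigit():
--             end += 1
--         curn = int(s[start: end])
--         if pre_symbol == '*':
--             cur_num = cur_num * curn
--         else:
--             cur_num = cur_num // curn
--
--         if end < slen:
--             pre_symbol = s[end]
--
--         start = end + 1
--
--     return cur_num * sign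
-- ===== SOURCE B (Python) =====
-- def parse_one(s):
--     sign = -1 if s[0] == '-' else 1
--     body = s[1:]
--     if not body:
--         return sign
--     result = 1
--     first, *rest = body.split('/')
--     for f in first.split('*'):
--         result *= int(f)
--     for piece in rest:
--         d, *ms = piece.split('*')
--         result //= int(d)
--         for m in ms:
--             result *= int(m)
--     return sign * result
-- ===== Notes on version B (the rewrite author's own statement) =====
-- stated objective: idiomatic
-- what changed: A scans the string with hand-maintained start/end indices, a digit-run inner loop and a remembered previous-operator character; B discards s[0], splits the body on the division separator and then on the multiplication separator, and folds int() over the resulting pieces (multiply through the first piece, floor-divide by the head of each later piece and multiply its remaining factors).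
-- outside the precondition, e.g. on parse_one('x1+2'): A returns 0, B raises ValueError; on parse_one('x5*'): A returns 5, B raises ValueError
import Mathlib
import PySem

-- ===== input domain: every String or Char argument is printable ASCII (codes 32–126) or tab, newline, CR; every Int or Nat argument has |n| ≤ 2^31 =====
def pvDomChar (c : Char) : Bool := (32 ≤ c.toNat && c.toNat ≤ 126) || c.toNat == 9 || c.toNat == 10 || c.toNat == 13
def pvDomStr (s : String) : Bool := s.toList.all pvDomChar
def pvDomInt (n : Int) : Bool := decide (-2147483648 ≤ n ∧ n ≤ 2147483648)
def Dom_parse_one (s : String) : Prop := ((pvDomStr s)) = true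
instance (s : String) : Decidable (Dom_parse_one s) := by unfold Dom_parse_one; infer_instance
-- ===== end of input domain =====

-- B replaces A's hand-rolled index scan by splitting the body on the division separator and then on
-- the multiplication separator and folding int() over the pieces (idiomatic decomposition, same cost).

-- ===== PORT A =====
-- inner while: while end < slen and s[end].isdigit(): end += 1
def parse_scanEnd (l : List Char) (slen e : Nat) : Nat :=
  if h : e < slen ∧ ((PySem.List.pyGet? l (e : Int)).map PySem.Chars.isdigit).getD false = true then
    parse_scanEnd l slen (e + 1)
  else e
termination_by slen - e
decreasing_by omega

-- (termination helper for the outer loop, cited in decreasing_by)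
theorem parse_scanEnd_ge (l : List Char) (slen e : Nat) : e ≤ parse_scanEnd l slen e := by
  unfold parse_scanEnd
  split
  · have := parse_scanEnd_ge l slen (e + 1); omega
  · exact Nat.le_refl e
termination_by slen - e
decreasing_by omega

-- outer while over (cur_num, pre_symbol, start)
def parse_loop (l : List Char) (slen : Nat) (cur : Int) (pre : Char) (start : Nat) : Option Int :=
  if h : start < slen then
    let e := parse_scanEnd l slen (start + 1)
    match PySem.Int.ofChars? (PySem.List.slice l (some (start : Int)) (some (e : Int))) with
    | none => none   -- int(s[start:end]) raises ValueError (excluded by Pre_)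
    | some curn =>
      let cur' := if pre = '*' then cur * curn else PySem.Int.floordiv cur curn
      let pre' := if e < slen then (PySem.List.pyGet? l (e : Int)).getD pre else pre
      parse_loop l slen cur' pre' (e + 1)
  else some cur
termination_by slen - start
decreasing_by have := parse_scanEnd_ge l slen (start + 1); omega

def parse_one (s : String) : Int :=
  let l := s.toList
  match PySem.List.pyGet? l (0 : Int) with
  | none => 0   -- s[0] raises IndexError on the empty string (excluded by Pre_)
  | some c0 =>
    let sign : Int := if c0 = '-' then -1 else 1
    ((parse_loop l l.length 1 '*' 1).getD 0) * sign

-- ===== PORT B =====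
-- for f in fs: result *= int(f)   (none = some int() raised ValueError)
def parse_mulFactors (acc : Option Int) (fs : List (List Char)) : Option Int :=
  fs.foldl (fun a t => a.bind fun x => (PySem.Int.ofChars? t).map (fun v => x * v)) acc

-- d, *ms = piece.split('*'); result //= int(d); for m in ms: result *= int(m)
def parse_divPiece (acc : Option Int) (p : List Char) : Option Int :=
  match PySem.Chars.splitOn p ['*'] with
  | [] => none   -- unreachable: split never returns an empty list
  | d :: ms =>
    parse_mulFactors (acc.bind fun x => (PySem.Int.ofChars? d).map
      (fun v => PySem.Int.floordiv x v)) ms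

def parse_one_alt (s : String) : Int :=
  match s.toList with
  | [] => 0   -- s[0] raises IndexError (excluded by Pre_)
  | c0 :: body =>
    let sign : Int := if c0 = '-' then -1 else 1
    if body.isEmpty then sign
    else
      match PySem.Chars.splitOn body ['/'] with
      | [] => 0   -- unreachable: split never returns an empty list
      | f :: rest =>
        match rest.foldl parse_divPiece (parse_mulFactors (some 1) (PySem.Chars.splitOn f ['*'])) with
        | none => 0   -- int() raised ValueError (excluded by Pre_)
        | some r => sign * r

-- ===== PRECONDITION & SPEC =====
-- a token is int()-parseable and all chars after its first are digits (so A's digit scan stops exactly at the separators)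
def pvTokOk (t : List Char) : Bool :=
  !t.isEmpty && (PySem.Int.ofChars? t).isSome && t.tail.all PySem.Chars.isdigit
def pvTokVal (t : List Char) : Int := (PySem.Int.ofChars? t).getD 0
def pvPieceOk (p : List Char) : Bool := (PySem.Chars.splitOn p ['*']).all pvTokOk

-- Pre_ excludes the empty string and any divisor token of value 0 (A raises there), and the strings on
-- which the body after the first character does not decompose into int-parseable tokens separated by
-- single multiplication/division operator characters: there A either raises, or silently ignores a
-- trailing operator, or treats an arbitrary other operator character (e.g. a plus sign) as division,
-- while B raises ValueError.
def Pre_parse_one (s : String) : Prop :=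
  s.toList ≠ [] ∧
  (s.toList.tail = [] ∨
    (pvPieceOk ((PySem.Chars.splitOn s.toList.tail ['/']).headD []) = true ∧
     ∀ p ∈ (PySem.Chars.splitOn s.toList.tail ['/']).tail,
       pvPieceOk p = true ∧ pvTokVal ((PySem.Chars.splitOn p ['*']).headD []) ≠ 0))
instance (s : String) : Decidable (Pre_parse_one s) := by unfold Pre_parse_one; infer_instance

def pvWitness_parse_one : String := "-12*3/4"

def Spec_parse_one (s : String) (out : Int) : Prop := out = parse_one_alt s
instance (s : String) (out : Int) : Decidable (Spec_parse_one s out) := by unfold Spec_parse_one; infer_instance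

-- ===== CLAIM (what is proved, stated in full; the proofs are below) =====
def Claim_equal_parse_one : Prop := ∀ (s : String), Dom_parse_one s → Pre_parse_one s → Spec_parse_one s (parse_one s)

-- ===== LEMMAS AND PROOFS =====

-- ---- a simple structural model of single-character splitting, tied to PySem.Chars.splitOn ----
def pvSplit (c : Char) : List Char → List (List Char)
  | [] => [[]]
  | x :: t =>
    if x = c then [] :: pvSplit c t
    else
      match pvSplit c t with
      | [] => [[x]]
      | p :: ps => (x :: p) :: ps

def pvJoin (c : Char) : List (List Char) → List Char
  | [] => []
  | p :: ps => p ++ ps.flatMap (fun q => c :: q)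

theorem pvSplit_ne_nil (c : Char) (l : List Char) : pvSplit c l ≠ [] := by
  cases l with
  | nil => simp [pvSplit]
  | cons x t =>
    simp only [pvSplit]
    split
    · simp
    · split <;> simp

theorem splitOn_go_eq (c : Char) :
    ∀ (fuel : Nat) (l cur : List Char) (acc : List (List Char)), l.length ≤ fuel →
    PySem.Chars.splitOn.go [c] fuel l cur acc =
      acc.reverse ++ (pvSplit c l).modifyHead (fun p => cur.reverse ++ p) := by
  intro fuel
  induction fuel with
  | zero =>
    intro l cur acc hl
    have : l = [] := by cases l <;> simp_all
    subst this
    simp [PySem.Chars.splitOn.go, pvSplit]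
  | succ n ih =>
    intro l cur acc hl
    cases l with
    | nil => simp [PySem.Chars.splitOn.go, pvSplit]
    | cons x t =>
      rw [PySem.Chars.splitOn.go]
      by_cases hx : x = c
      · subst hx
        have hpre : List.isPrefixOf [x] (x :: t) = true := by simp [List.isPrefixOf]
        rw [if_pos hpre]
        simp only [List.length_cons, List.length_nil, List.drop_succ_cons, List.drop_zero]
        rw [ih t [] ((List.reverse cur) :: acc) (by simpa using hl)]
        simp [pvSplit]
        cases pvSplit x t <;> simp
      · have hpre : List.isPrefixOf [c] (x :: t) = false := by
          simp [List.isPrefixOf]; exact fun h => absurd h.symm hx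
        rw [if_neg (by simp [hpre])]
        rw [ih t (x :: cur) acc (by simpa using Nat.le_of_succ_le_succ hl)]
        simp only [pvSplit, if_neg hx]
        rcases h : pvSplit c t with _ | ⟨p, ps⟩
        · exact absurd h (pvSplit_ne_nil c t)
        · simp

theorem splitOn_eq_pvSplit (c : Char) (l : List Char) :
    PySem.Chars.splitOn l [c] = pvSplit c l := by
  rw [PySem.Chars.splitOn, splitOn_go_eq c (l.length + 1) l [] [] (by omega)]
  cases h : pvSplit c l with
  | nil => exact absurd h (pvSplit_ne_nil c l)
  | cons p ps => simp

theorem pvJoin_pvSplit (c : Char) (l : List Char) : pvJoin c (pvSplit c l) = l := by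
  induction l with
  | nil => simp [pvSplit, pvJoin]
  | cons x t ih =>
    simp only [pvSplit]
    by_cases hx : x = c
    · subst hx
      rw [if_pos rfl]
      rcases h : pvSplit x t with _ | ⟨p, ps⟩
      · exact absurd h (pvSplit_ne_nil x t)
      · rw [h] at ih; simp [pvJoin] at ih ⊢; simpa [pvJoin] using ih
    · rw [if_neg hx]
      rcases h : pvSplit c t with _ | ⟨p, ps⟩
      · exact absurd h (pvSplit_ne_nil c t)
      · rw [h] at ih; simp [pvJoin] at ih ⊢; simpa [pvJoin] using ih

-- ---- a list-level model of A's index loop ----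
def pvLoopL (cur : Int) (pre : Char) : List Char → Option Int
  | [] => some cur
  | c :: t =>
    match PySem.Int.ofChars? (c :: t.takeWhile PySem.Chars.isdigit) with
    | none => none
    | some v =>
      let cur' := if pre = '*' then cur * v else PySem.Int.floordiv cur v
      match h : t.dropWhile PySem.Chars.isdigit with
      | [] => some cur'
      | o :: r => pvLoopL cur' o r
termination_by l => l.length
decreasing_by
  have h1 := List.length_dropWhile_le PySem.Chars.isdigit t
  rw [h] at h1; simp at h1 ⊢; omega

theorem parse_scanEnd_spec (l : List Char) (e : Nat) (he : e ≤ l.length) :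
    parse_scanEnd l l.length e = e + ((l.drop e).takeWhile PySem.Chars.isdigit).length := by
  unfold parse_scanEnd
  split
  · next h =>
    obtain ⟨hlt, hdig⟩ := h
    rw [PySem.List.pyGet?_natCast] at hdig
    rw [List.getElem?_eq_getElem hlt] at hdig
    simp only [Option.map_some, Option.getD_some] at hdig
    have hdrop : l.drop e = l[e] :: l.drop (e + 1) := (List.getElem_cons_drop hlt).symm
    rw [parse_scanEnd_spec l (e + 1) (by omega)]
    rw [hdrop, List.takeWhile_cons, if_pos hdig]
    simp; omega
  · next h =>
    by_cases hlt : e < l.length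
    · have hdig : PySem.Chars.isdigit l[e] = false := by
        by_contra hc
        apply h
        refine ⟨hlt, ?_⟩
        rw [PySem.List.pyGet?_natCast, List.getElem?_eq_getElem hlt]
        simp at hc ⊢; exact hc
      have hdrop : l.drop e = l[e] :: l.drop (e + 1) := (List.getElem_cons_drop hlt).symm
      rw [hdrop, List.takeWhile_cons, if_neg (by simp [hdig])]
      simp
    · have : l.length ≤ e := by omega
      rw [List.drop_eq_nil_of_le this]
      simp
termination_by l.length - e
decreasing_by omega

theorem parse_loop_eq_pvLoopL (l : List Char) (cur : Int) (pre : Char) (start : Nat) :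
    parse_loop l l.length cur pre start = pvLoopL cur pre (l.drop start) := by
  unfold parse_loop
  split
  · next hlt =>
    have hs1 : start + 1 ≤ l.length := by omega
    set t := l.drop (start + 1) with ht
    set tw := t.takeWhile PySem.Chars.isdigit with htw
    set dw := t.dropWhile PySem.Chars.isdigit with hdw
    have hes : parse_scanEnd l l.length (start + 1) = (start + 1) + tw.length :=
      parse_scanEnd_spec l (start + 1) hs1
    have hdrop : l.drop start = l[start] :: t := (List.getElem_cons_drop hlt).symm
    have htdw : tw ++ dw = t := List.takeWhile_append_dropWhile
    -- the sliced token is l[start] :: tw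
    have hslice : PySem.List.slice l (some (start : Int)) (some ((parse_scanEnd l l.length (start + 1) : Nat) : Int))
        = l[start] :: tw := by
      rw [PySem.List.slice_natCast, hes]
      have : start + 1 + tw.length - start = tw.length + 1 := by omega
      rw [this, hdrop]
      simp only [List.take_succ_cons]
      congr 1
      have hpfx : tw <+: t := List.takeWhile_prefix _
      rw [List.prefix_iff_eq_take] at hpfx
      exact hpfx.symm
    simp only [hes] at hslice ⊢
    rw [hslice, hdrop]
    rw [pvLoopL]
    cases hof : PySem.Int.ofChars? (l[start] :: tw) with
    | none => simp
    | some v =>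
      simp only []
      set cur' := if pre = '*' then cur * v else PySem.Int.floordiv cur v with hcur'
      have hdropE : l.drop (start + 1 + tw.length) = dw := by
        rw [← List.drop_drop, ← ht, ← htdw, List.drop_left]
      cases hdweq : dw with
      | nil =>
        -- scan reached the end: e = l.length
        have h2 : (List.drop (start + 1) l).length = l.length - (start + 1) := List.length_drop
        have h3 : t.length = tw.length := by
          rw [← htdw, hdweq]; simp
        have hlen : start + 1 + tw.length = l.length := by
          rw [← h3]; rw [ht, h2]; omega
        simp only [hlen]
        rw [parse_loop_eq_pvLoopL]
        rw [List.drop_eq_nil_of_le (by omega)]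
        simp only [pvLoopL, lt_irrefl, if_false]
        split
        · rfl
        · next o r heq =>
          rw [← hdw, hdweq] at heq; exact absurd heq (by simp)
      | cons o r =>
        have hcons : l.drop (start + 1 + tw.length) = o :: r := by rw [hdropE, hdweq]
        have hlt2 : start + 1 + tw.length < l.length := by
          by_contra hc
          rw [List.drop_eq_nil_of_le (by omega)] at hcons
          simp at hcons
        have h1 : l[start + 1 + tw.length]? = some o := by
          have h0 : (l.drop (start + 1 + tw.length))[0]? = some o := by rw [hcons]; rfl
          simpa using h0
        have hgete : (PySem.List.pyGet? l ((start + 1 + tw.length : Nat) : Int)).getD pre = o := by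
          rw [PySem.List.pyGet?_natCast, h1]; rfl
        simp only [if_pos hlt2, hgete]
        rw [parse_loop_eq_pvLoopL]
        have hr : l.drop (start + 1 + tw.length + 1) = r := by
          have h1 : l.drop (start + 1 + tw.length + 1) = (l.drop (start + 1 + tw.length)).drop 1 := by
            rw [List.drop_drop]
          rw [h1, hcons, List.drop_one, List.tail_cons]
        rw [hr]
        split
        · next heq => rw [← hdw, hdweq] at heq; exact absurd heq (by simp)
        · next o' r' heq =>
          rw [← hdw, hdweq] at heq
          obtain ⟨rfl, rfl⟩ : o = o' ∧ r = r' := by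
            constructor <;> [exact (List.cons.injEq .. ▸ heq).1 ; exact (List.cons.injEq .. ▸ heq).2]
          rfl
  · next hge =>
    rw [List.drop_eq_nil_of_le (by omega)]
    simp [pvLoopL]
termination_by l.length - start
decreasing_by
  all_goals have := parse_scanEnd_ge l l.length (start + 1)
  all_goals omega

-- ---- the common evaluation of the flat (operator, token) list ----
def pvApp (x : Int) (o : Char) (v : Int) : Int :=
  if o = '*' then x * v else PySem.Int.floordiv x v

def pvEval (r : Int) (T : List (Char × List Char)) : Int :=
  T.foldl (fun x ot => pvApp x ot.1 (pvTokVal ot.2)) r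

def pvRender (t0 : List Char) (T : List (Char × List Char)) : List Char :=
  t0 ++ T.flatMap (fun ot => ot.1 :: ot.2)

theorem tw_all {ds rest : List Char} (h : ds.all PySem.Chars.isdigit = true) :
    (ds ++ rest).takeWhile PySem.Chars.isdigit = ds ++ rest.takeWhile PySem.Chars.isdigit ∧
    (ds ++ rest).dropWhile PySem.Chars.isdigit = rest.dropWhile PySem.Chars.isdigit := by
  simp only [List.all_eq_true] at h
  have h1 : ds.takeWhile PySem.Chars.isdigit = ds := List.takeWhile_eq_self_iff.mpr h
  have h2 : ds.dropWhile PySem.Chars.isdigit = [] := List.dropWhile_eq_nil_iff.mpr h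
  constructor
  · rw [List.takeWhile_append, if_pos (by rw [h1])]
  · rw [List.dropWhile_append, if_pos (by rw [h2]; rfl)]

theorem pvLoopL_render (T : List (Char × List Char)) (cur : Int) (pre : Char) (t0 : List Char)
    (h0 : pvTokOk t0 = true)
    (hT : ∀ ot ∈ T, PySem.Chars.isdigit ot.1 = false ∧ pvTokOk ot.2 = true) :
    pvLoopL cur pre (pvRender t0 T) = some (pvEval (pvApp cur pre (pvTokVal t0)) T) := by
  simp only [pvTokOk, Bool.and_eq_true, Bool.not_eq_eq_eq_not] at h0
  obtain ⟨⟨hne, hsome⟩, hds⟩ := h0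
  obtain ⟨c, ds, rfl⟩ : ∃ c ds, t0 = c :: ds := by
    cases t0 with
    | nil => simp at hne
    | cons c ds => exact ⟨c, ds, rfl⟩
  simp only [List.tail_cons] at hds
  have hofv : PySem.Int.ofChars? (c :: ds) = some (pvTokVal (c :: ds)) := by
    rw [pvTokVal]
    cases hx : PySem.Int.ofChars? (c :: ds) with
    | none => rw [hx] at hsome; simp at hsome
    | some v => rfl
  cases T with
  | nil =>
    simp only [pvRender, List.flatMap_nil, List.append_nil]
    rw [pvLoopL]
    have := tw_all (rest := []) hds
    simp only [List.append_nil] at this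
    rw [this.1]
    simp only [List.takeWhile_nil, List.append_nil, hofv]
    split
    · simp [pvEval, pvApp]
    · next o r heq =>
      rw [this.2] at heq; simp at heq
  | cons ot T' =>
    obtain ⟨o, t⟩ := ot
    have hot := hT (o, t) (by simp)
    simp only at hot
    have : pvRender (c :: ds) ((o, t) :: T') = c :: (ds ++ o :: pvRender t T') := by
      simp [pvRender, List.flatMap_cons]
    rw [this, pvLoopL]
    have htw := tw_all (rest := o :: pvRender t T') hds
    rw [htw.1]
    have hto : (o :: pvRender t T').takeWhile PySem.Chars.isdigit = [] := by
      rw [List.takeWhile_cons, if_neg (by simp [hot.1])]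
    have hdo : (o :: pvRender t T').dropWhile PySem.Chars.isdigit = o :: pvRender t T' := by
      rw [List.dropWhile_cons, if_neg (by simp [hot.1])]
    simp only [hto, List.append_nil, hofv]
    split
    · next heq => rw [htw.2, hdo] at heq; simp at heq
    · next o' r' heq =>
      rw [htw.2, hdo] at heq
      obtain ⟨rfl, rfl⟩ : o = o' ∧ pvRender t T' = r' := by
        exact ⟨(List.cons.injEq .. ▸ heq).1, (List.cons.injEq .. ▸ heq).2⟩
      rw [pvLoopL_render T' _ o t hot.2 (fun x hx => hT x (by simp [hx]))]
      simp [pvEval, pvApp]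

-- ---- B's grouped folds compute pvEval of the flat token list ----
def pvPieceToks (p : List Char) : List (Char × List Char) :=
  ('/', (pvSplit '*' p).headD []) :: (pvSplit '*' p).tail.map (fun t => ('*', t))

theorem pvTokVal_some {t : List Char} (h : pvTokOk t = true) :
    PySem.Int.ofChars? t = some (pvTokVal t) := by
  simp only [pvTokOk, Bool.and_eq_true] at h
  rw [pvTokVal]
  cases hx : PySem.Int.ofChars? t with
  | none => rw [hx] at h; simp at h
  | some v => rfl

theorem parse_mulFactors_spec (fs : List (List Char)) (r : Int)
    (h : ∀ t ∈ fs, pvTokOk t = true) :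
    parse_mulFactors (some r) fs = some (pvEval r (fs.map (fun t => ('*', t)))) := by
  induction fs generalizing r with
  | nil => simp [parse_mulFactors, pvEval]
  | cons t ts ih =>
    have ht := pvTokVal_some (h t (by simp))
    have step : parse_mulFactors (some r) (t :: ts) = parse_mulFactors (some (r * pvTokVal t)) ts := by
      simp [parse_mulFactors, ht]
    rw [step, ih _ (fun x hx => h x (by simp [hx]))]
    simp [pvEval, pvApp]

theorem parse_divFold_spec (rest : List (List Char)) (r : Int)
    (h : ∀ p ∈ rest, pvPieceOk p = true) :
    rest.foldl parse_divPiece (some r) = some (pvEval r (rest.flatMap pvPieceToks)) := by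
  induction rest generalizing r with
  | nil => simp [pvEval]
  | cons p ps ih =>
    have hp : pvPieceOk p = true := h p (by simp)
    rw [pvPieceOk, splitOn_eq_pvSplit, List.all_eq_true] at hp
    rcases hsp : pvSplit '*' p with _ | ⟨d, ms⟩
    · exact absurd hsp (pvSplit_ne_nil '*' p)
    · rw [hsp] at hp
      have hd := pvTokVal_some (hp d (by simp))
      have step : parse_divPiece (some r) p =
          parse_mulFactors (some (PySem.Int.floordiv r (pvTokVal d))) ms := by
        rw [parse_divPiece, splitOn_eq_pvSplit, hsp]
        simp [hd]
      simp only [List.foldl_cons, step]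
      rw [parse_mulFactors_spec ms _ (fun x hx => hp x (by simp [hx]))]
      rw [ih _ (fun x hx => h x (by simp [hx]))]
      congr 1
      simp only [List.flatMap_cons, pvPieceToks, hsp]
      simp [pvEval, List.foldl_append, pvApp]

theorem pvPieceToks_flat (p : List Char)
    : (pvPieceToks p).flatMap (fun ot => ot.1 :: ot.2) = '/' :: p := by
  rcases hsp : pvSplit '*' p with _ | ⟨d, ms⟩
  · exact absurd hsp (pvSplit_ne_nil '*' p)
  · have hj := pvJoin_pvSplit '*' p
    rw [hsp] at hj
    simp only [pvPieceToks, hsp, List.flatMap_cons, List.headD_cons, List.tail_cons]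
    simp only [pvJoin] at hj
    simp [List.flatMap_map, ← hj]

-- ===== VERDICT (by name: the statement is the Claim_ definition above) =====
theorem parse_one_spec : Claim_equal_parse_one := by
  unfold Claim_equal_parse_one
  intro s _hdom hpre
  unfold Spec_parse_one
  obtain ⟨hne, hbody⟩ := hpre
  obtain ⟨c0, body, hl⟩ : ∃ c0 body, s.toList = c0 :: body := by
    cases h : s.toList with
    | nil => exact absurd h hne
    | cons c0 body => exact ⟨c0, body, rfl⟩
  rw [hl] at hbody
  simp only [List.tail_cons] at hbody
  have hget0 : PySem.List.pyGet? (c0 :: body) (0 : Int) = some c0 := by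
    rw [show (0 : Int) = ((0 : Nat) : Int) from rfl, PySem.List.pyGet?_natCast]
    rfl
  rw [parse_one, parse_one_alt]
  simp only [hl]
  rw [parse_loop_eq_pvLoopL]
  simp only [hget0, List.drop_succ_cons, List.drop_zero]
  rcases hbody with hbe | ⟨hf, hrest⟩
  · subst hbe
    simp [pvLoopL]
  · -- body is nonempty: it starts with the first factor, which is a nonempty token
    rcases hP : pvSplit '/' body with _ | ⟨f, rest⟩
    · exact absurd hP (pvSplit_ne_nil '/' body)
    rw [splitOn_eq_pvSplit, hP] at hf hrest
    simp only [List.headD_cons, List.tail_cons] at hf hrest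
    rcases hF : pvSplit '*' f with _ | ⟨t0, ts⟩
    · exact absurd hF (pvSplit_ne_nil '*' f)
    have hfall : ∀ t ∈ t0 :: ts, pvTokOk t = true := by
      rw [pvPieceOk, splitOn_eq_pvSplit, hF, List.all_eq_true] at hf
      exact hf
    have ht0 : pvTokOk t0 = true := hfall t0 (by simp)
    have hbne : body.isEmpty = false := by
      have hj := pvJoin_pvSplit '/' body
      rw [hP] at hj
      have hjf := pvJoin_pvSplit '*' f
      rw [hF] at hjf
      have ht0ne : t0 ≠ [] := by
        have := ht0
        simp only [pvTokOk, Bool.and_eq_true, Bool.not_eq_eq_eq_not] at this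
        simpa using this.1.1
      cases body with
      | nil =>
        exfalso
        simp only [pvJoin] at hj hjf
        cases t0 with
        | nil => exact ht0ne rfl
        | cons a b => rw [← hjf] at hj; simp at hj
      | cons _ _ => rfl
    rw [hbne]
    simp only [Bool.false_eq_true, if_false]
    set T : List (Char × List Char) :=
      ts.map (fun t => ('*', t)) ++ rest.flatMap pvPieceToks with hT
    have hTcond : ∀ ot ∈ T, PySem.Chars.isdigit ot.1 = false ∧ pvTokOk ot.2 = true := by
      intro ot hot
      rw [hT] at hot
      rcases List.mem_append.mp hot with hin | hin
      · obtain ⟨t, htm, rfl⟩ := List.mem_map.mp hin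
        exact ⟨(by decide : PySem.Chars.isdigit '*' = false), hfall t (by simp [htm])⟩
      · obtain ⟨p, hpm, hptm⟩ := List.mem_flatMap.mp hin
        have hp : pvPieceOk p = true := (hrest p hpm).1
        rw [pvPieceOk, splitOn_eq_pvSplit, List.all_eq_true] at hp
        rcases hsp : pvSplit '*' p with _ | ⟨d, ms⟩
        · exact absurd hsp (pvSplit_ne_nil '*' p)
        rw [hsp] at hp
        rw [pvPieceToks, hsp] at hptm
        simp only [List.headD_cons, List.tail_cons] at hptm
        rcases List.mem_cons.mp hptm with rfl | hin2
        · exact ⟨(by decide : PySem.Chars.isdigit '/' = false), hp d (List.mem_cons_self)⟩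
        · obtain ⟨m, hmm, rfl⟩ := List.mem_map.mp hin2
          exact ⟨(by decide : PySem.Chars.isdigit '*' = false), hp m (List.mem_cons_of_mem _ hmm)⟩
    have hrender : body = pvRender t0 T := by
      have hj := pvJoin_pvSplit '/' body
      rw [hP] at hj
      have hjf := pvJoin_pvSplit '*' f
      rw [hF] at hjf
      rw [← hj]
      simp only [pvJoin, pvRender, hT]
      rw [← hjf]
      simp only [pvJoin, List.flatMap_append, List.flatMap_map, List.flatMap_assoc]
      simp only [List.append_assoc]
      congr 1
      congr 1
      exact (List.flatMap_congr (fun p _ => pvPieceToks_flat p)).symm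
    simp only [splitOn_eq_pvSplit, hP, hF]
    rw [hrender, pvLoopL_render T 1 '*' t0 ht0 hTcond]
    rw [parse_mulFactors_spec (t0 :: ts) 1 hfall]
    rw [parse_divFold_spec rest _ (fun p hp => (hrest p hp).1)]
    simp only [List.map_cons, pvEval, List.foldl_cons, List.foldl_append, hT]
    simp only [Option.getD_some]
    exact mul_comm _ _
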